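-- pv_equiv track=rewrite | github.com/mirni/a2a | gateway/src/sql_validator.py | _contains_semicolon_outside_strings
-- ===== SOURCE A (Python) =====
-- def _contains_semicolon_outside_strings(sql: str) -> bool:
--     """Check if SQL contains semicolons outside of single-quoted string literals.
--
--     Strips a single trailing semicolon first (harmless).
--     """
--     stripped = sql.strip().rstrip(";").strip()
--
--     in_string = False
--     for char in stripped:
--         if char == "'":
--             in_string = not in_string
--         elif char == ";" and not in_string:
--             return True
--     return False
-- ===== SOURCE B (Python) =====
-- def _contains_semicolon_outside_strings(sql: str) -> bool:
--     """Same preprocessing as A; then partition on single quotes: the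
--     even-indexed segments of split("'") are exactly the text outside
--     single-quoted literals, so check only those for a semicolon."""
--     stripped = sql.strip().rstrip(";").strip()
--     return any(";" in seg for i, seg in enumerate(stripped.split("'")) if i % 2 == 0)
-- ===== Notes on version B (the rewrite author's own statement) =====
-- stated objective: idiomatic
-- what changed: Replaces the character-by-character in_string state machine with a partition: split the stripped text on single quotes and test only the even-indexed segments (the text outside string literals) for a semicolon.
import Mathlib
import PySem

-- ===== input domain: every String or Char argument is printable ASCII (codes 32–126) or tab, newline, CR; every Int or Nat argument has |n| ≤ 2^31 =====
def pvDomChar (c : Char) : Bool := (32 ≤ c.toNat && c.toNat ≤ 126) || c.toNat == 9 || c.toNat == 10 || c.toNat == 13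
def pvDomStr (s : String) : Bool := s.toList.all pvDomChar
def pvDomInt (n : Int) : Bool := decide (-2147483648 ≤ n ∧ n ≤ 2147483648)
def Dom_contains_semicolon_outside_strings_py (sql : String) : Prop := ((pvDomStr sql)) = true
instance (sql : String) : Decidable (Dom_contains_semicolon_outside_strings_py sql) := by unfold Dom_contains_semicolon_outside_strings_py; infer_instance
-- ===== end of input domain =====

-- B replaces A's character-by-character in_string state machine by splitting on single
-- quotes and scanning only the even-indexed segments (the text outside string literals);
-- same O(n) cost, a different (partition-based) decomposition.

-- ===== PORT A =====
-- the for-loop with early return, state in_string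
def csosLoopA : List Char → Bool → Bool
  | [], _ => false
  | c :: rest, inString =>
    if c = '\'' then csosLoopA rest (!inString)
    else if c = ';' ∧ inString = false then true
    else csosLoopA rest inString

def contains_semicolon_outside_strings_py (sql : String) : Bool :=
  -- stripped = sql.strip().rstrip(";").strip(); rstrip(";") ported by hand
  -- (drop all trailing ';' characters — exact for Python's rstrip with a 1-char set)
  let stripped := PySem.Chars.strip
    (((PySem.Chars.strip sql.toList).reverse.dropWhile (fun c => c == ';')).reverse)
  csosLoopA stripped false

-- ===== PORT B =====
def contains_semicolon_outside_strings_py_alt (sql : String) : Bool :=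
  -- stripped = sql.strip().rstrip(";").strip()  (rstrip(";") ported by hand as in port A)
  let stripped := PySem.Chars.strip
    (((PySem.Chars.strip sql.toList).reverse.dropWhile (fun c => c == ';')).reverse)
  -- any(";" in seg for i, seg in enumerate(stripped.split("'")) if i % 2 == 0)
  (((PySem.List.enumerate (PySem.Chars.splitOn stripped ['\''])).filter
      (fun p => PySem.Int.mod p.1 2 == 0)).any
    (fun p => PySem.Chars.isIn [';'] p.2))

-- ===== PRECONDITION & SPEC =====
def Spec_contains_semicolon_outside_strings_py (sql : String) (out : Bool) : Prop := out = contains_semicolon_outside_strings_py_alt sql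
instance (sql : String) (out : Bool) : Decidable (Spec_contains_semicolon_outside_strings_py sql out) := by unfold Spec_contains_semicolon_outside_strings_py; infer_instance

-- ===== CLAIM (what is proved, stated in full; the proofs are below) =====
def Claim_equal_contains_semicolon_outside_strings_py : Prop := ∀ (sql : String), Dom_contains_semicolon_outside_strings_py sql → Spec_contains_semicolon_outside_strings_py sql (contains_semicolon_outside_strings_py sql)

-- ===== LEMMAS AND PROOFS =====

-- reference splitter: splitQ cs = cs split on the single-quote character
def splitQ : List Char → List (List Char)
  | [] => [[]]
  | c :: rest =>
    if c = '\'' then [] :: splitQ rest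
    else match splitQ rest with
         | [] => [[c]]
         | s :: ss => (c :: s) :: ss

theorem splitQ_ne_nil (cs : List Char) : splitQ cs ≠ [] := by
  cases cs with
  | nil => simp [splitQ]
  | cons c rest =>
    simp only [splitQ]
    split
    · simp
    · split <;> simp

-- prepend onto the head segment
def consHead (p : List Char) : List (List Char) → List (List Char)
  | [] => [p]
  | s :: ss => (p ++ s) :: ss

theorem splitOn_go_quote (l : List Char) :
    ∀ (fuel : Nat) (cur : List Char) (acc : List (List Char)), l.length < fuel →
      PySem.Chars.splitOn.go ['\''] fuel l cur acc
        = acc.reverse ++ consHead cur.reverse (splitQ l) := by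
  induction l with
  | nil =>
    intro fuel cur acc h
    cases fuel with
    | zero => omega
    | succ f =>
      rw [PySem.Chars.splitOn.go]
      all_goals first
      | omega
      | simp [splitQ, consHead]
  | cons c rest ih =>
    intro fuel cur acc h
    cases fuel with
    | zero => omega
    | succ f =>
      rw [PySem.Chars.splitOn.go]
      by_cases hc : c = '\''
      · subst hc
        simp only [List.isPrefixOf, BEq.rfl, Bool.true_and, if_pos, List.length_cons,
          List.drop_succ_cons, List.length_nil, List.drop_zero]
        rw [ih f [] ((cur.reverse) :: acc) (by simpa using Nat.lt_of_succ_lt_succ h)]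
        obtain ⟨s, ss, hs⟩ : ∃ s ss, splitQ rest = s :: ss := by
          cases hq : splitQ rest with
          | nil => exact absurd hq (splitQ_ne_nil rest)
          | cons s ss => exact ⟨s, ss, rfl⟩
        simp [splitQ, hs, consHead]
      · have hpre : (['\''].isPrefixOf (c :: rest)) = false := by
          simp [List.isPrefixOf, Ne.symm hc]
        simp only [hpre, Bool.false_eq_true, if_false]
        rw [ih f (c :: cur) acc (by simpa using Nat.lt_of_succ_lt_succ h)]
        obtain ⟨s, ss, hs⟩ : ∃ s ss, splitQ rest = s :: ss := by
          cases hq : splitQ rest with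
          | nil => exact absurd hq (splitQ_ne_nil rest)
          | cons s ss => exact ⟨s, ss, rfl⟩
        simp [splitQ, hc, hs, consHead]

theorem splitOn_quote (cs : List Char) :
    PySem.Chars.splitOn cs ['\''] = splitQ cs := by
  unfold PySem.Chars.splitOn
  rw [splitOn_go_quote cs (cs.length + 1) [] [] (by omega)]
  obtain ⟨s, ss, hs⟩ : ∃ s ss, splitQ cs = s :: ss := by
    cases hq : splitQ cs with
    | nil => exact absurd hq (splitQ_ne_nil cs)
    | cons s ss => exact ⟨s, ss, rfl⟩
  simp [hs, consHead]

-- alternating any: b = currently inside a string literal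
def anyAlt : Bool → List (List Char) → Bool
  | _, [] => false
  | b, s :: ss => (!b && PySem.Chars.isIn [';'] s) || anyAlt (!b) ss

theorem isIn_singleton (a : Char) (l : List Char) :
    PySem.Chars.isIn [a] l = l.contains a := by
  by_cases hm : a ∈ l
  · obtain ⟨s, t, rfl⟩ := List.append_of_mem hm
    rw [(PySem.Chars.isIn_iff_infix _ _).mpr ⟨s, t, by simp⟩]
    simp
  · rw [(PySem.Chars.isIn_eq_false_iff _ _).mpr (fun hinf => hm (hinf.subset (by simp)))]
    simp [hm]

theorem loopA_eq_anyAlt (cs : List Char) : ∀ b, csosLoopA cs b = anyAlt b (splitQ cs) := by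
  induction cs with
  | nil => intro b; simp [csosLoopA, splitQ, anyAlt, isIn_singleton]
  | cons c rest ih =>
    intro b
    by_cases hc : c = '\''
    · subst hc
      simp [csosLoopA, splitQ, anyAlt, isIn_singleton, ih]
    · obtain ⟨s, ss, hs⟩ : ∃ s ss, splitQ rest = s :: ss := by
        cases hq : splitQ rest with
        | nil => exact absurd hq (splitQ_ne_nil rest)
        | cons s ss => exact ⟨s, ss, rfl⟩
      by_cases hsemi : c = ';'
      · subst hsemi
        cases b with
        | false => simp [csosLoopA, splitQ, hc, hs, anyAlt, isIn_singleton]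
        | true =>
          have hstep : csosLoopA (';' :: rest) true = csosLoopA rest true := by
            simp [csosLoopA, hc]
          rw [hstep, ih true]
          simp [splitQ, hc, hs, anyAlt, isIn_singleton]
      · rw [show csosLoopA (c :: rest) b = csosLoopA rest b by
          simp [csosLoopA, hc, hsemi]]
        rw [ih b, hs]
        have hsemi' : ¬ (';' = c) := fun h => hsemi h.symm
        simp [splitQ, hc, hs, anyAlt, isIn_singleton, hsemi']

theorem enum_any (ss : List (List Char)) : ∀ (k : Int), 0 ≤ k →
    (((PySem.List.enumerate ss k).filter (fun p => PySem.Int.mod p.1 2 == 0)).any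
        (fun p => PySem.Chars.isIn [';'] p.2))
      = anyAlt (decide (k % 2 = 1)) ss := by
  induction ss with
  | nil => intro k hk; simp [PySem.List.enumerate_nil, anyAlt]
  | cons s ss ih =>
    intro k hk
    rw [PySem.List.enumerate_cons]
    have hmod : PySem.Int.mod k 2 = k % 2 := PySem.Int.mod_eq_emod_of_pos (by norm_num)
    by_cases hpar : k % 2 = 1
    · have h0 : ¬ (PySem.Int.mod k 2 == 0) = true := by simp [hpar]
      have h1 : (k + 1) % 2 = 0 := by omega
      rw [List.filter_cons_of_neg (by simpa using h0)]
      rw [ih (k + 1) (by omega)]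
      simp [anyAlt, hpar, h1]
    · have h0 : (PySem.Int.mod k 2 == 0) = true := by
        have : k % 2 = 0 := by omega
        simp [this]
      have h1 : (k + 1) % 2 = 1 := by omega
      rw [List.filter_cons_of_pos (by simpa using h0)]
      rw [List.any_cons, ih (k + 1) (by omega)]
      simp [anyAlt, hpar, h1]

theorem main_eq (cs : List Char) :
    csosLoopA cs false
      = (((PySem.List.enumerate (PySem.Chars.splitOn cs ['\''])).filter
            (fun p => PySem.Int.mod p.1 2 == 0)).any
          (fun p => PySem.Chars.isIn [';'] p.2)) := by
  rw [splitOn_quote, enum_any _ 0 (by norm_num), loopA_eq_anyAlt]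
  norm_num

-- ===== VERDICT (by name: the statement is the Claim_ definition above) =====
theorem contains_semicolon_outside_strings_py_spec : Claim_equal_contains_semicolon_outside_strings_py := by
  intro sql _
  show contains_semicolon_outside_strings_py sql = contains_semicolon_outside_strings_py_alt sql
  exact main_eq _
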